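-- pv_equiv track=rewrite | github.com/HighW0rks/Sensor_System | Update.py | parse_files_changed
-- ===== SOURCE A (Python) =====
-- def parse_files_changed(body_text):
--     files_changed = []
--     lines = body_text.split('\n')
--     start_index = -1
--     for i, line in enumerate(lines):
--         if line.strip().startswith("Files changed:"):
--             start_index = i
--             break
--     if start_index != -1:
--         for line in lines[start_index + 1:]:
--             if line.strip():
--                 files_changed.append(line.strip().lstrip('- '))
--             else:
--                 break
--     return files_changed
-- ===== SOURCE B (Python) =====
-- def parse_files_changed(body_text):
--     # Stage 1: group the stripped lines into paragraphs (blocks) separated by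
--     # blank (whitespace-only) lines.
--     blocks, cur = [], []
--     for line in body_text.split('\n'):
--         s = line.strip()
--         if s:
--             cur.append(s)
--         else:
--             blocks.append(cur)
--             cur = []
--     blocks.append(cur)
--     # Stage 2: the first header line anywhere lies in some block; the answer is
--     # the rest of that block (collection stops at the blank line ending it).
--     for block in blocks:
--         for j, s in enumerate(block):
--             if s.startswith("Files changed:"):
--                 return [t.lstrip('- ') for t in block[j + 1:]]
--     return []
-- ===== Notes on version B (the rewrite author's own statement) =====
-- stated objective: alternative
-- what changed: Replaced A's single scan (index search for the header, then a break-on-blank collection loop with an accumulator) by two staged passes: first group the stripped lines into blank-separated paragraphs, then search the paragraphs for the first header line and return the remainder of its paragraph.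
import Mathlib
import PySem

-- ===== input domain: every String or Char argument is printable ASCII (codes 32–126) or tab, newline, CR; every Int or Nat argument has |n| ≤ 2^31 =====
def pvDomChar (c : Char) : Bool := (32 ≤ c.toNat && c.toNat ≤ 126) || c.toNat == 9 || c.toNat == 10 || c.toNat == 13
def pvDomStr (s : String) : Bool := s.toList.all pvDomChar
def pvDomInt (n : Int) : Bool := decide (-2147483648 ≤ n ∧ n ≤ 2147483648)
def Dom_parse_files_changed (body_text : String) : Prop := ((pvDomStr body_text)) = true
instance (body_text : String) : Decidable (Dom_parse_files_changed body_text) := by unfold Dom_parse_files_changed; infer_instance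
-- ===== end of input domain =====

-- B replaces A's single scan (index search, then break-on-blank collection) with two
-- staged passes: group the stripped lines into blank-separated paragraphs, then search
-- the paragraphs for the header and return the rest of its paragraph (idiomatic; same cost).

-- hand port of s.lstrip('- ') (PySem has no lstrip-with-chars): drop leading chars in {'-',' '}; exact
def pvLstripDashes (s : String) : String :=
  String.ofList (s.toList.dropWhile (fun c => c == '-' || c == ' '))

-- ===== PORT A =====
-- the first loop of A: enumerate lines, return index of first matching line, else -1
def pvFindStartA : List String → Int → Int
  | [], _ => -1
  | l :: ls, i =>
    if PySem.Str.startswith (PySem.Str.strip l) "Files changed:" then i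
    else pvFindStartA ls (i + 1)

-- the second loop of A: append stripped lines until a blank line breaks
def pvCollectA : List String → List String → List String
  | [], acc => acc
  | l :: ls, acc =>
    if PySem.Str.strip l ≠ "" then
      pvCollectA ls (acc ++ [pvLstripDashes (PySem.Str.strip l)])
    else acc

def parse_files_changed (body_text : String) : List String :=
  let lines := (PySem.Str.split? body_text "\n").getD []
  let start_index := pvFindStartA lines 0
  if start_index ≠ -1 then
    pvCollectA (PySem.List.slice lines (some (start_index + 1)) none) []
  else []

-- ===== PORT B =====
-- Stage-1 loop of B: group the stripped lines into blank-separated paragraphs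
def pvBlocks : List String → List String → List (List String)
  | [], cur => [cur]
  | l :: ls, cur =>
    if PySem.Str.strip l ≠ "" then pvBlocks ls (cur ++ [PySem.Str.strip l])
    else cur :: pvBlocks ls []

-- inner loop of stage 2: first header line of one paragraph, and the rest of it
def pvFindInBlock : List String → Option (List String)
  | [] => none
  | s :: rest =>
    if PySem.Str.startswith s "Files changed:" then some (rest.map pvLstripDashes)
    else pvFindInBlock rest

-- outer loop of stage 2 over the paragraphs
def pvSearchBlocks : List (List String) → List String
  | [] => []
  | b :: bs =>
    match pvFindInBlock b with
    | some r => r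
    | none => pvSearchBlocks bs

def parse_files_changed_alt (body_text : String) : List String :=
  let lines := (PySem.Str.split? body_text "\n").getD []
  pvSearchBlocks (pvBlocks lines [])

-- ===== PRECONDITION & SPEC =====
def Spec_parse_files_changed (body_text : String) (out : List String) : Prop := out = parse_files_changed_alt body_text
instance (body_text : String) (out : List String) : Decidable (Spec_parse_files_changed body_text out) := by unfold Spec_parse_files_changed; infer_instance

-- ===== CLAIM (what is proved, stated in full; the proofs are below) =====
def Claim_equal_parse_files_changed : Prop := ∀ (body_text : String), Dom_parse_files_changed body_text → Spec_parse_files_changed body_text (parse_files_changed body_text)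

-- ===== LEMMAS AND PROOFS =====

-- the canonical value both programs compute
def pvP (l : String) : Bool := !PySem.Str.startswith (PySem.Str.strip l) "Files changed:"
def pvF (l : String) : String := pvLstripDashes (PySem.Str.strip l)
def pvNB (l : String) : Bool := PySem.Str.strip l != ""

def pvCanon (lines : List String) : List String :=
  match lines.dropWhile pvP with
  | [] => []
  | _ :: tl => (tl.takeWhile pvNB).map pvF

-- A's index search = index arithmetic over takeWhile/dropWhile of the negated predicate
theorem pvFindStartA_eq (lines : List String) (i : Int) :
    pvFindStartA lines i =
      if lines.dropWhile pvP = [] then -1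
      else i + (lines.takeWhile pvP).length := by
  induction lines generalizing i with
  | nil => simp [pvFindStartA]
  | cons l ls ih =>
    by_cases h : PySem.Str.startswith (PySem.Str.strip l) "Files changed:" = true
    · simp only [pvFindStartA, h, pvP, List.dropWhile_cons, List.takeWhile_cons, Bool.not_true,
        reduceIte, Bool.false_eq_true, List.length_nil]
      simp
    · rw [Bool.not_eq_true] at h
      simp only [pvFindStartA, h, pvP, List.dropWhile_cons, List.takeWhile_cons, Bool.not_false,
        reduceIte, Bool.false_eq_true, List.length_cons]
      rw [ih]
      split_ifs with h2
      · rfl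
      · push_cast; ring

-- A's collection loop = takeWhile + map, with the accumulator made explicit
theorem pvCollectA_eq (ls acc : List String) :
    pvCollectA ls acc = acc ++ (ls.takeWhile pvNB).map pvF := by
  induction ls generalizing acc with
  | nil => simp [pvCollectA]
  | cons l ls ih =>
    by_cases h : PySem.Str.strip l = ""
    · simp [pvCollectA, h, pvNB, List.takeWhile]
    · have hb : pvNB l = true := by simp [pvNB, h]
      simp [pvCollectA, h, hb, List.takeWhile, ih, pvF]

theorem drop_takeWhile_length {α : Type} (p : α → Bool) (l : List α) :
    l.drop (l.takeWhile p).length = l.dropWhile p := by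
  nth_rewrite 2 [← List.takeWhile_append_dropWhile (p := p) (l := l)]
  exact List.drop_left

-- A computes the canonical value
theorem a_canon (body_text : String) :
    parse_files_changed body_text = pvCanon ((PySem.Str.split? body_text "\n").getD []) := by
  unfold parse_files_changed pvCanon
  dsimp only
  set lines := (PySem.Str.split? body_text "\n").getD [] with hlines
  rw [pvFindStartA_eq]
  by_cases h : lines.dropWhile pvP = []
  · rw [if_pos h, h]; simp
  · rw [if_neg h]
    set k := (lines.takeWhile pvP).length with hk
    have hk0 : (0 : Int) ≤ (k : Int) := Int.natCast_nonneg k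
    rw [if_pos (by omega)]
    have hslice : PySem.List.slice lines (some ((0 : Int) + (k : Int) + 1)) none = lines.drop (k + 1) := by
      rw [show ((0 : Int) + (k : Int) + 1) = ((k + 1 : Nat) : Int) by push_cast; ring,
        PySem.List.slice_from lines (by positivity)]
      simp
    rw [hslice, pvCollectA_eq, List.nil_append]
    obtain ⟨hd, tl, htl⟩ : ∃ hd tl, lines.dropWhile pvP = hd :: tl := by
      cases hdw : lines.dropWhile pvP with
      | nil => exact absurd hdw h
      | cons a b => exact ⟨a, b, rfl⟩
    have hdrop : lines.drop (k + 1) = tl := by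
      have h2 := drop_takeWhile_length pvP lines
      rw [htl] at h2
      rw [← List.drop_drop, hk, h2]
      rfl
    rw [hdrop, htl]

-- searching a concatenated paragraph = search the first part, then the second
theorem pvFindInBlock_append (b c : List String) :
    pvFindInBlock (b ++ c) =
      match pvFindInBlock b with
      | some r => some (r ++ c.map pvLstripDashes)
      | none => pvFindInBlock c := by
  induction b with
  | nil => simp [pvFindInBlock]
  | cons s rest ih =>
    simp only [List.cons_append, pvFindInBlock]
    split_ifs with h
    · simp
    · exact ih

-- a blank line never matches the header
theorem blank_no_match (l : String) (h : PySem.Str.strip l = "") : pvP l = true := by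
  simp only [pvP, h]
  decide

-- the main invariant of B's staged computation
theorem b_main (ls cur : List String) :
    pvSearchBlocks (pvBlocks ls cur) =
      match pvFindInBlock cur with
      | some r => r ++ (ls.takeWhile pvNB).map pvF
      | none => pvCanon ls := by
  induction ls generalizing cur with
  | nil =>
    simp only [pvBlocks, pvSearchBlocks, pvCanon, List.dropWhile_nil, List.takeWhile_nil,
      List.map_nil, List.append_nil]
  | cons l ls ih =>
    by_cases h : PySem.Str.strip l = ""
    · -- blank line: close the current paragraph
      have hnb : pvNB l = false := by simp [pvNB, h]
      have hp : pvP l = true := blank_no_match l h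
      simp only [pvBlocks, h, ne_eq, not_true_eq_false, reduceIte, pvSearchBlocks]
      have hcanon : pvCanon (l :: ls) = pvCanon ls := by
        simp [pvCanon, List.dropWhile_cons, hp]
      rw [hcanon]
      cases hfc : pvFindInBlock cur with
      | some r =>
        simp [List.takeWhile_cons, hnb]
      | none =>
        rw [ih []]
        simp [pvFindInBlock]
    · -- non-blank line: extend the current paragraph
      have hnb : pvNB l = true := by simp [pvNB, h]
      simp only [pvBlocks, h, ne_eq, not_false_eq_true, reduceIte]
      rw [ih (cur ++ [PySem.Str.strip l]), pvFindInBlock_append]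
      cases hfc : pvFindInBlock cur with
      | some r =>
        simp [pvFindInBlock, List.takeWhile_cons, hnb, pvF]
      | none =>
        simp only [pvFindInBlock]
        split_ifs with hm
        · have hp : pvP l = false := by
            simp only [pvP, PySem.Str.startswith_eq, PySem.Str.toList_strip] at hm ⊢
            rw [hm]; rfl
          simp [pvCanon, hp]
        · rw [Bool.not_eq_true] at hm
          have hp : pvP l = true := by
            simp only [pvP, PySem.Str.startswith_eq, PySem.Str.toList_strip] at hm ⊢
            rw [hm]; rfl
          simp [pvCanon, hp]

-- B computes the canonical value
theorem b_canon (body_text : String) :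
    parse_files_changed_alt body_text = pvCanon ((PySem.Str.split? body_text "\n").getD []) := by
  unfold parse_files_changed_alt
  rw [b_main]
  simp [pvFindInBlock]

-- ===== VERDICT (by name: the statement is the Claim_ definition above) =====
theorem parse_files_changed_spec : Claim_equal_parse_files_changed := by
  intro body_text _
  unfold Spec_parse_files_changed
  rw [a_canon, b_canon]
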